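-- pv_equiv track=rewrite | github.com/Mayistikar/Python-Algoritmos_y_programacion | 6.8.3.modificacion_ptoanterior.py | espacios
-- ===== SOURCE A (Python) =====
-- def espacios(cadena, cantidad):
-- 	"""
-- 	Dada una cadena esta funcion inserta _ por cada espacio
-- 	modifica la cadena SOLO hasta la posicion "cantidad"
-- 	PARAMETROS:
-- 		una cadena string
-- 	RETORNO:
-- 		una cadena string
-- 	"""
-- 	lista=""
-- 	contador=0
-- 	for pos in range(len(cadena)):
-- 		if cadena[pos]==" " and contador<cantidad:
-- 			lista+="_"
-- 			contador+=1
-- 		else: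
-- 			lista+=cadena[pos]
-- 	return lista
-- ===== SOURCE B (Python) =====
-- def espacios(cadena, cantidad):
--     return cadena.replace(' ', '_', max(cantidad, 0))
-- ===== Notes on version B (the rewrite author's own statement) =====
-- stated objective: faster
-- what changed: Replaced the explicit character-by-character loop with its accumulator string and counter by a single call to str.replace with a count (clamped to 0 for non-positive counts, matching A).
import Mathlib
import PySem

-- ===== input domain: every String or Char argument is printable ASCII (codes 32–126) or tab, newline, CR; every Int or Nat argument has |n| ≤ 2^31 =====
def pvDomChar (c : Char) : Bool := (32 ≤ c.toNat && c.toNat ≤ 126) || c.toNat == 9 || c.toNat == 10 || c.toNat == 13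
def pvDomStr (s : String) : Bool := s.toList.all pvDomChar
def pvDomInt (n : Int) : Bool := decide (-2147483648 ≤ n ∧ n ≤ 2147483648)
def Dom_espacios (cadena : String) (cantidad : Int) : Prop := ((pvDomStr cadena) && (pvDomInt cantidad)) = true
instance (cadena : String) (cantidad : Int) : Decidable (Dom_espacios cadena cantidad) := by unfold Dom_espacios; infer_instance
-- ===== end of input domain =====

-- B replaces A's indexed accumulate-and-count loop by one `str.replace(' ', '_', max(cantidad, 0))` call.

-- ===== PORT A =====
-- literal port: loop over range(len(cadena)), state = (lista, contador)
def espacios (cadena : String) (cantidad : Int) : String :=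
  let s := cadena.toList
  let r := (PySem.List.pyRange 0 (PySem.Str.len cadena)).foldl
      (fun (st : List Char × Int) pos =>
        let c := PySem.List.pyGetD s pos ' '
        if c == ' ' && decide (st.2 < cantidad) then (st.1 ++ ['_'], st.2 + 1)
        else (st.1 ++ [c], st.2))
      ([], 0)
  String.mk r.1

-- ===== PORT B =====
-- Hand port of `str.replace(' ', '_', n)` for the single-character pattern ' ':
-- CPython scans left to right replacing the first n occurrences; exact here because
-- old and new are single characters, so occurrences are exactly the space positions.
def replCountSpace : List Char → Nat → List Char
  | cs, 0 => cs
  | [], _ + 1 => []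
  | c :: cs, n + 1 => if c == ' ' then '_' :: replCountSpace cs n else c :: replCountSpace cs (n + 1)

def espacios_alt (cadena : String) (cantidad : Int) : String :=
  String.mk (replCountSpace cadena.toList (max cantidad 0).toNat)

-- ===== PRECONDITION & SPEC =====
def Spec_espacios (cadena : String) (cantidad : Int) (out : String) : Prop := out = espacios_alt cadena cantidad
instance (cadena : String) (cantidad : Int) (out : String) : Decidable (Spec_espacios cadena cantidad out) := by unfold Spec_espacios; infer_instance

-- ===== CLAIM (what is proved, stated in full; the proofs are below) =====
def Claim_equal_espacios : Prop := ∀ (cadena : String) (cantidad : Int), Dom_espacios cadena cantidad → Spec_espacios cadena cantidad (espacios cadena cantidad)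

-- ===== LEMMAS AND PROOFS =====

theorem replCountSpace_cons (c : Char) (cs : List Char) (n : Nat) :
    replCountSpace (c :: cs) n =
      if c = ' ' ∧ 0 < n then '_' :: replCountSpace cs (n - 1) else c :: replCountSpace cs n := by
  cases n with
  | zero =>
      simp [replCountSpace]
  | succ m =>
      by_cases hc : c = ' ' <;> simp [replCountSpace, hc]

theorem replCountSpace_nil (n : Nat) : replCountSpace [] n = [] := by
  cases n <;> simp [replCountSpace]

theorem espacios_loop (cantidad : Int) (cs : List Char) :
    ∀ (acc : List Char) (k : Int),
      (cs.foldl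
        (fun (st : List Char × Int) c =>
          if c == ' ' && decide (st.2 < cantidad) then (st.1 ++ ['_'], st.2 + 1)
          else (st.1 ++ [c], st.2))
        (acc, k)).1 = acc ++ replCountSpace cs (cantidad - k).toNat := by
  induction cs with
  | nil => intro acc k; simp [replCountSpace_nil]
  | cons c rest ih =>
      intro acc k
      rw [List.foldl_cons, replCountSpace_cons]
      by_cases hc : c = ' '
      · by_cases hk : k < cantidad
        · have h1 : (0 : Nat) < (cantidad - k).toNat := by omega
          have h2 : (cantidad - (k + 1)).toNat = (cantidad - k).toNat - 1 := by omega
          have hstep : (if c == ' ' && decide ((acc, k).2 < cantidad) then ((acc, k).1 ++ ['_'], (acc, k).2 + 1)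
            else ((acc, k).1 ++ [c], (acc, k).2)) = (acc ++ ['_'], k + 1) := by
            simp [hc, hk]
          rw [hstep, ih, h2, if_pos ⟨hc, h1⟩]
          simp
        · have h1 : ¬ (c = ' ' ∧ (0 : Nat) < (cantidad - k).toNat) := by
            rintro ⟨-, h0⟩; omega
          have hstep : (if c == ' ' && decide ((acc, k).2 < cantidad) then ((acc, k).1 ++ ['_'], (acc, k).2 + 1)
            else ((acc, k).1 ++ [c], (acc, k).2)) = (acc ++ [c], k) := by
            simp [hk]
          rw [hstep, ih, if_neg h1]
          simp
      · have h1 : ¬ (c = ' ' ∧ (0 : Nat) < (cantidad - k).toNat) := fun h => hc h.1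
        have hstep : (if c == ' ' && decide ((acc, k).2 < cantidad) then ((acc, k).1 ++ ['_'], (acc, k).2 + 1)
            else ((acc, k).1 ++ [c], (acc, k).2)) = (acc ++ [c], k) := by
          simp [hc]
        rw [hstep, ih, if_neg h1]
        simp

-- ===== VERDICT (by name: the statement is the Claim_ definition above) =====
theorem espacios_spec : Claim_equal_espacios := by
  intro cadena cantidad _
  unfold Spec_espacios espacios espacios_alt
  change (String.mk (List.foldl
      (fun (st : List Char × Int) j =>
        (fun (st : List Char × Int) (c : Char) =>
          if (c == ' ' && decide (st.2 < cantidad)) = true then (st.1 ++ ['_'], st.2 + 1)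
          else (st.1 ++ [c], st.2)) st (PySem.List.pyGetD cadena.toList j ' '))
      ([], 0) (PySem.List.pyRange 0 (PySem.List.len cadena.toList))).1) = _
  rw [PySem.List.foldl_pyRange_pyGetD cadena.toList ' '
      (fun (st : List Char × Int) (c : Char) =>
        if c == ' ' && decide (st.2 < cantidad) then (st.1 ++ ['_'], st.2 + 1)
        else (st.1 ++ [c], st.2)) ([], 0) (le_refl 0)]
  simp only [Int.toNat_zero, List.drop_zero]
  rw [espacios_loop]
  have h : (cantidad - 0).toNat = (max cantidad 0).toNat := by omega
  rw [List.nil_append, h]
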